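-- pv_equiv track=rewrite | github.com/bc36/leetcode | Python/lc2500_2599.py | findTheString
-- ===== SOURCE A (Python) =====
-- import bisect, collections, functools, heapq, itertools, math, operator, string
-- from typing import List, Optional, Tuple
--
-- def findTheString(lcp: List[List[int]]) -> str:
--     n = len(lcp)
--     s = [""] * n
--     i = 0  # 还没有填入字母的 s[i]
--     # O(n)
--     for c in string.ascii_lowercase:
--         while i < n and s[i]:
--             i += 1
--         if i == n:
--             break  # 构造完毕
--         # 贪心
--         for j in range(i, n):
--             if lcp[i][j]:
--                 s[j] = c
--     if "" in s:
--         return ""  # 没有构造完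
--
--     # 直接在原数组上检查 s 的 lcp 是否和输入一致
--     # O(n^2)
--     for i in range(n - 1, -1, -1):
--         for j in range(n - 1, -1, -1):
--             # actual_lcp = (
--             #     0
--             #     if s[i] != s[j]
--             #     else 1
--             #     if i == n - 1 or j == n - 1
--             #     else lcp[i + 1][j + 1] + 1
--             # )
--
--             # equals to
--
--             actual_lcp = -1
--             if s[i] != s[j]:
--                 actual_lcp = 0
--             elif i == n - 1 or j == n - 1:
--                 actual_lcp = 1
--             else:
--                 actual_lcp = lcp[i + 1][j + 1] + 1
--
--             if lcp[i][j] != actual_lcp: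
--                 return ""
--             # 检查不通过, 为什么不用重新构造?
--             # lcp 是一个 pattern, 和字符没什么关系
--
--     return "".join(s)
-- ===== SOURCE B (Python) =====
-- def findTheString(lcp):
--     n = len(lcp)
--     # phase 1: pick the class leaders: position i is a leader iff no earlier
--     # leader's row marks it; a leader needing a 27th letter or with lcp[i][i]==0
--     # cannot get a letter, so the answer is "".
--     leaders = []
--     for i in range(n):
--         if all(lcp[l][i] == 0 for l in leaders):
--             if len(leaders) == 26 or lcp[i][i] == 0:
--                 return ""
--             leaders.append(i)
--     # phase 2: each position's letter comes from the last leader whose row marks it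
--     s = []
--     for j in range(n):
--         c = ""
--         for k in range(len(leaders)):
--             l = leaders[k]
--             if l <= j and lcp[l][j]:
--                 c = chr(97 + k)
--         s.append(c)
--     # phase 3: verify by directly measuring the common prefix of each suffix pair
--     for i in range(n):
--         for j in range(n):
--             m = 0
--             while i + m < n and j + m < n and s[i + m] == s[j + m]:
--                 m += 1
--             if lcp[i][j] != m:
--                 return ""
--     return "".join(s)
-- ===== Notes on version B (the rewrite author's own statement) =====
-- stated objective: alternative
-- what changed: B first computes the list of class leaders (positions no earlier leader's row marks), then derives each position's letter independently as the last marking leader, and verifies by directly measuring the common prefix length of every suffix pair with a while loop, instead of A's letter-by-letter in-place array filling with a skip pointer and the in-place DP-recurrence check against the input matrix.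
-- outside the precondition, e.g. on findTheString([[0, 0], [0]]): A returns '', B returns ''; on findTheString([[1, 0], [0]]): A raises IndexError, B raises IndexError
import Mathlib
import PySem

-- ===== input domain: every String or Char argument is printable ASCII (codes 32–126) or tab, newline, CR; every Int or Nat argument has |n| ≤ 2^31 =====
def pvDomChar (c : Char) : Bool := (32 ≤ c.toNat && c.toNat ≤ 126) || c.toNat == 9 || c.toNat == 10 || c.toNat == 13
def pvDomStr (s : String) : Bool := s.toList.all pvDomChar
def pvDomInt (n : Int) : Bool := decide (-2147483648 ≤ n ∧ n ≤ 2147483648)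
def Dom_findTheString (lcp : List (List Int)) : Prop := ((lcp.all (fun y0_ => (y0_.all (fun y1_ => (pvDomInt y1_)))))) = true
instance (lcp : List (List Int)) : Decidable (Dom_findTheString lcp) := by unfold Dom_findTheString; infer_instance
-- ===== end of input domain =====

-- B picks the class leaders first, derives each position's letter independently (last marking
-- leader), and verifies by measuring each suffix pair's common prefix directly, instead of A's
-- letter-by-letter in-place filling and in-place DP-recurrence check; objective: alternative.


-- ===== PORT A =====
-- `while i < n and s[i]:` — advance i past already-filled slots
def pvSkip (s : List String) (n : Nat) (i : Nat) : Nat :=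
  if h : i < n ∧ ¬ s.getD i "" = "" then pvSkip s n (i + 1) else i
  termination_by n - i
  decreasing_by omega

-- `for j in range(i, n): if lcp[i][j]: s[j] = c`  (indices are in range under Pre_, so getD is exact)
def pvFill (row : List Int) (i n : Nat) (c : String) (s : List String) : List String :=
  (List.range' i (n - i)).foldl (fun t j => if row.getD j 0 ≠ 0 then t.set j c else t) s

-- string.ascii_lowercase
def pvLetters : List String :=
  ["a","b","c","d","e","f","g","h","i","j","k","l","m",
   "n","o","p","q","r","s","t","u","v","w","x","y","z"]

-- `for c in string.ascii_lowercase: … if i == n: break …` with state (s, i)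
def pvBuildA (lcp : List (List Int)) (n : Nat) : List String → List String → Nat → List String
  | [], s, _ => s
  | c :: cs, s, i =>
      let i' := pvSkip s n i
      if i' = n then s
      else pvBuildA lcp n cs (pvFill (lcp.getD i' []) i' n c s) i'

-- A's `actual_lcp` if/elif/else chain (the -1 initialisation is overwritten on every path)
def pvActualA (lcp : List (List Int)) (s : List String) (n i j : Nat) : Int :=
  if ¬ s.getD i "" = s.getD j "" then 0
  else if i = n - 1 ∨ j = n - 1 then 1
  else (lcp.getD (i + 1) []).getD (j + 1) 0 + 1

-- inner `for j in range(n-1,-1,-1)` with early `return ""` on mismatch (short-circuit &&)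
def pvCheckRowA (lcp : List (List Int)) (s : List String) (n i : Nat) : List Nat → Bool
  | [] => true
  | j :: js =>
      ((lcp.getD i []).getD j 0 == pvActualA lcp s n i j) && pvCheckRowA lcp s n i js

-- outer `for i in range(n-1,-1,-1)`; range(n-1,-1,-1) is ported as (List.range n).reverse (exact for Nat n)
def pvCheckA (lcp : List (List Int)) (s : List String) (n : Nat) : List Nat → Bool
  | [] => true
  | i :: is => pvCheckRowA lcp s n i (List.range n).reverse && pvCheckA lcp s n is

def findTheString (lcp : List (List Int)) : String :=
  let n := lcp.length
  let s := pvBuildA lcp n pvLetters (List.replicate n "") 0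
  if s.contains "" then ""
  else if pvCheckA lcp s n (List.range n).reverse then String.join s else ""

-- ===== PORT B =====
-- chr(97 + k)
def pvLetterB (k : Nat) : String := (Char.ofNat (97 + k)).toString

-- phase 1: `for i in range(n): if all(lcp[l][i]==0 for l in leaders): …`; none = early `return ""`
def pvLeadB (lcp : List (List Int)) : List Nat → List Nat → Option (List Nat)
  | [], L => some L
  | i :: is, L =>
      if L.all (fun l => (lcp.getD l []).getD i 0 == 0) then
        if L.length = 26 ∨ (lcp.getD i []).getD i 0 = 0 then none
        else pvLeadB lcp is (L ++ [i])
      else pvLeadB lcp is L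

-- phase 2 inner loop: `c = ""; for k in range(len(leaders)): … c = chr(97+k)`
def pvLetterOf (lcp : List (List Int)) (L : List Nat) (j : Nat) : String :=
  (List.range L.length).foldl
    (fun c k =>
      if L.getD k 0 ≤ j ∧ (lcp.getD (L.getD k 0) []).getD j 0 ≠ 0 then pvLetterB k else c) ""

-- phase 3: `m = 0; while i+m < n and j+m < n and s[i+m] == s[j+m]: m += 1`
def pvSlcpLoop (s : List String) (n i j m : Nat) : Nat :=
  if h : i + m < n ∧ j + m < n ∧ s.getD (i + m) "" = s.getD (j + m) "" then
    pvSlcpLoop s n i j (m + 1)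
  else m
  termination_by n - m
  decreasing_by omega

-- phase 3 nested scan with early `return ""` (short-circuit all)
def pvCheckBs (lcp : List (List Int)) (s : List String) (n : Nat) : Bool :=
  (List.range n).all fun i => (List.range n).all fun j =>
    (lcp.getD i []).getD j 0 == (pvSlcpLoop s n i j 0 : Int)

def findTheString_alt (lcp : List (List Int)) : String :=
  let n := lcp.length
  match pvLeadB lcp (List.range n) [] with
  | none => ""
  | some L =>
      let s := (List.range n).map (pvLetterOf lcp L)
      if pvCheckBs lcp s n then String.join s else ""

-- ===== PRECONDITION & SPEC =====
-- Pre_ excludes ragged inputs: when some row is shorter than len(lcp), Python A raises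
-- IndexError on almost all of them (and on the rest returns "" before touching the short row).
def Pre_findTheString (lcp : List (List Int)) : Prop :=
  ∀ row ∈ lcp, lcp.length ≤ row.length

instance (lcp : List (List Int)) : Decidable (Pre_findTheString lcp) := by
  unfold Pre_findTheString; infer_instance

def pvWitness_findTheString : List (List Int) := [[2, 0], [0, 1]]

def Spec_findTheString (lcp : List (List Int)) (out : String) : Prop := out = findTheString_alt lcp
instance (lcp : List (List Int)) (out : String) : Decidable (Spec_findTheString lcp out) := by unfold Spec_findTheString; infer_instance

-- ===== CLAIM (what is proved, stated in full; the proofs are below) =====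
def Claim_equal_findTheString : Prop := ∀ (lcp : List (List Int)), Dom_findTheString lcp → Pre_findTheString lcp → Spec_findTheString lcp (findTheString lcp)

-- ===== LEMMAS AND PROOFS =====

-- The functional description of the string both constructions build from a leader list L
def pvMkS (lcp : List (List Int)) (L : List Nat) (n : Nat) : List String :=
  (List.range n).map (pvLetterOf lcp L)

lemma pvMkS_length (lcp : List (List Int)) (L : List Nat) (n : Nat) :
    (pvMkS lcp L n).length = n := by simp [pvMkS]

lemma pvMkS_getD (lcp : List (List Int)) (L : List Nat) (n j : Nat) (hj : j < n) :
    (pvMkS lcp L n).getD j "" = pvLetterOf lcp L j := by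
  rw [List.getD_eq_getElem _ _ (by simpa [pvMkS] using hj)]
  simp [pvMkS]

lemma pvLetterB_ne (k : Nat) : pvLetterB k ≠ "" := by
  intro h
  have := congrArg String.toList h
  simp [pvLetterB, Char.toString] at this

-- fold with only nonempty overwrites: result "" iff nothing fired
lemma pvFoldLetter_empty_iff (p : Nat → Prop) [DecidablePred p] (l : List Nat) :
    ∀ init : String,
      (l.foldl (fun c k => if p k then pvLetterB k else c) init = ""
        ↔ init = "" ∧ ∀ k ∈ l, ¬ p k) := by
  induction l with
  | nil => intro init; simp
  | cons k ks ih =>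
      intro init
      simp only [List.foldl_cons, ih]
      constructor
      · rintro ⟨h1, h2⟩
        split at h1
        · exact absurd h1 (pvLetterB_ne k)
        · rename_i hp
          exact ⟨h1, by simpa [hp] using h2⟩
      · rintro ⟨h1, h2⟩
        have hk : ¬ p k := h2 k (List.mem_cons_self)
        refine ⟨by simp [hk, h1], fun k' hk' => h2 k' (List.mem_cons_of_mem _ hk')⟩

lemma pvLetterOf_empty_iff (lcp : List (List Int)) (L : List Nat) (j : Nat) :
    pvLetterOf lcp L j = ""
      ↔ ∀ k < L.length, ¬ (L.getD k 0 ≤ j ∧ (lcp.getD (L.getD k 0) []).getD j 0 ≠ 0) := by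
  unfold pvLetterOf
  rw [pvFoldLetter_empty_iff (fun k => L.getD k 0 ≤ j ∧ (lcp.getD (L.getD k 0) []).getD j 0 ≠ 0)]
  simp [List.mem_range]

lemma foldl_ext_mem {α β : Type} (f g : β → α → β) (l : List α)
    (h : ∀ b, ∀ a ∈ l, f b a = g b a) : ∀ init, l.foldl f init = l.foldl g init := by
  induction l with
  | nil => intro init; rfl
  | cons a l ih =>
      intro init
      simp only [List.foldl_cons]
      rw [h init a List.mem_cons_self]
      exact ih (fun b a' ha' => h b a' (List.mem_cons_of_mem _ ha')) _

lemma pvLetterOf_snoc (lcp : List (List Int)) (L : List Nat) (l j : Nat) :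
    pvLetterOf lcp (L ++ [l]) j =
      if l ≤ j ∧ (lcp.getD l []).getD j 0 ≠ 0 then pvLetterB L.length
      else pvLetterOf lcp L j := by
  unfold pvLetterOf
  have hlen : (L ++ [l]).length = L.length + 1 := by simp
  rw [hlen, List.range_succ, List.foldl_append]
  have hpref : ∀ init : String,
      (List.range L.length).foldl
        (fun c k => if (L ++ [l]).getD k 0 ≤ j ∧ (lcp.getD ((L ++ [l]).getD k 0) []).getD j 0 ≠ 0
          then pvLetterB k else c) init
      = (List.range L.length).foldl
        (fun c k => if L.getD k 0 ≤ j ∧ (lcp.getD (L.getD k 0) []).getD j 0 ≠ 0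
          then pvLetterB k else c) init := by
    apply foldl_ext_mem
    intro b k hk
    rw [List.mem_range] at hk
    have he : (L ++ [l]).getD k 0 = L.getD k 0 := by
      rw [List.getD_eq_getElem _ _ (by simp; omega), List.getElem_append_left hk,
          List.getD_eq_getElem _ _ hk]
    rw [he]
  rw [hpref]
  have hl : (L ++ [l]).getD L.length 0 = l := by
    rw [List.getD_eq_getElem _ _ (by simp)]
    simp
  simp only [List.foldl_cons, List.foldl_nil, hl]

-- pointwise value of pvFill
lemma pvFoldSet_getD (row : List Int) (c : String) (l : List Nat) (k : Nat)
    (hk : ∀ j ∈ l, j ≠ k) :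
    ∀ s : List String,
      (l.foldl (fun t j => if row.getD j 0 ≠ 0 then t.set j c else t) s).getD k ""
        = s.getD k "" := by
  induction l with
  | nil => intro s; rfl
  | cons j js ih =>
      intro s
      simp only [List.foldl_cons]
      rw [ih (fun j' hj' => hk j' (List.mem_cons_of_mem _ hj'))]
      split
      · rw [List.getD_eq_getElem?_getD, List.getD_eq_getElem?_getD,
            List.getElem?_set_ne (hk j List.mem_cons_self)]
      · rfl

lemma pvFill_length (row : List Int) (i n : Nat) (c : String) (s : List String) :
    (pvFill row i n c s).length = s.length := by
  unfold pvFill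
  generalize List.range' i (n - i) = l
  induction l generalizing s with
  | nil => rfl
  | cons j js ih =>
      simp only [List.foldl_cons]
      rw [ih]
      split <;> simp

lemma pvFoldSet_getD_mem (row : List Int) (c : String) :
    ∀ (l : List Nat) (k : Nat), l.Nodup → k ∈ l →
      ∀ s : List String, k < s.length →
      (l.foldl (fun t j => if row.getD j 0 ≠ 0 then t.set j c else t) s).getD k ""
        = if row.getD k 0 ≠ 0 then c else s.getD k "" := by
  intro l
  induction l with
  | nil => intro k _ hmem; cases hmem
  | cons j js ih =>
      intro k hnd hmem s hs
      simp only [List.foldl_cons]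
      rcases List.mem_cons.mp hmem with rfl | hmem'
      · have hnotin : k ∉ js := (List.nodup_cons.mp hnd).1
        rw [pvFoldSet_getD row c js k (fun j' hj' h => hnotin (h ▸ hj'))]
        split
        · rw [List.getD_eq_getElem (s.set k c) "" (by simpa using hs)]
          simp [List.getElem_set_self]
        · rfl
      · have hnd' : js.Nodup := (List.nodup_cons.mp hnd).2
        rw [ih k hnd' hmem' _ (by split <;> simpa using hs)]
        by_cases hjk : j = k
        · subst hjk; exact absurd hmem' (List.nodup_cons.mp hnd).1
        · have hset : (if row.getD j 0 ≠ 0 then s.set j c else s).getD k "" = s.getD k "" := by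
            split
            · rw [List.getD_eq_getElem?_getD, List.getD_eq_getElem?_getD,
                  List.getElem?_set_ne hjk]
            · rfl
          rw [hset]

lemma pvFill_getD (row : List Int) (i n : Nat) (c : String) (s : List String)
    (hlen : s.length = n) (j : Nat) (hj : j < n) :
    (pvFill row i n c s).getD j ""
      = if i ≤ j ∧ row.getD j 0 ≠ 0 then c else s.getD j "" := by
  unfold pvFill
  by_cases hij : i ≤ j
  · have hmem : j ∈ List.range' i (n - i) := List.mem_range'_1.mpr ⟨hij, by omega⟩
    rw [pvFoldSet_getD_mem row c _ j List.nodup_range' hmem s (by omega)]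
    by_cases hrow : row.getD j 0 ≠ 0
    · rw [if_pos hrow, if_pos ⟨hij, hrow⟩]
    · rw [if_neg hrow, if_neg (fun h => hrow h.2)]
  · rw [pvFoldSet_getD row c _ j
      (fun j' hj' h => hij (h ▸ (List.mem_range'_1.mp hj').1)),
      if_neg (fun h => hij h.1)]

lemma getD_ext (s t : List String) (n : Nat) (hs : s.length = n) (ht : t.length = n)
    (h : ∀ j < n, s.getD j "" = t.getD j "") : s = t := by
  apply List.ext_getElem (by omega)
  intro j hj _
  have := h j (by omega)
  rwa [List.getD_eq_getElem s "" hj, List.getD_eq_getElem t "" (by omega)] at this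

-- the fill step extends the leader list
lemma pvFill_mkS (lcp : List (List Int)) (L : List Nat) (l n : Nat) :
    pvFill (lcp.getD l []) l n (pvLetterB L.length) (pvMkS lcp L n)
      = pvMkS lcp (L ++ [l]) n := by
  apply getD_ext _ _ n (by rw [pvFill_length, pvMkS_length]) (pvMkS_length _ _ _)
  intro j hj
  rw [pvFill_getD _ _ _ _ _ (pvMkS_length _ _ _) j hj, pvMkS_getD _ _ _ _ hj,
      pvMkS_getD _ _ _ _ hj, pvLetterOf_snoc]

-- skip lemmas
lemma pvSkip_stop (s : List String) (n i : Nat) (h : ¬ i < n ∨ s.getD i "" = "") :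
    pvSkip s n i = i := by
  rw [pvSkip, dif_neg (by tauto)]

lemma pvBuildA_skip (lcp : List (List Int)) (n : Nat) (cs : List String) (s : List String)
    (i : Nat) (h1 : i < n) (h2 : ¬ s.getD i "" = "") :
    pvBuildA lcp n cs s i = pvBuildA lcp n cs s (i + 1) := by
  cases cs with
  | nil => rfl
  | cons c cs =>
      have : pvSkip s n i = pvSkip s n (i + 1) := by rw [pvSkip, dif_pos ⟨h1, h2⟩]
      simp only [pvBuildA, this]

lemma getD_mem (s : List String) (i : Nat) (hi : i < s.length) (h : s.getD i "" = "") :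
    "" ∈ s := by
  rw [List.getD_eq_getElem s "" hi] at h
  exact h ▸ List.getElem_mem hi

lemma pvFill_getD_self (row : List Int) (i n : Nat) (c : String) (s : List String)
    (hin : i < n) (hlen : i < s.length) :
    (pvFill row i n c s).getD i "" = if row.getD i 0 ≠ 0 then c else s.getD i "" := by
  unfold pvFill
  have hsplit : n - i = (n - i - 1) + 1 := by omega
  rw [hsplit, List.range'_succ, List.foldl_cons]
  rw [pvFoldSet_getD row c _ i (by intro j hj; have := (List.mem_range'_1.mp hj).1; omega)]
  split
  · rw [List.getD_eq_getElem ((s.set i c)) "" (by simpa using hlen)]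
    simp [List.getElem_set_self]
  · rfl

lemma pvBuildA_stuck (lcp : List (List Int)) (n : Nat) (cs : List String) (s : List String)
    (i : Nat) (hin : i < n) (hlen : s.length = n)
    (hempty : s.getD i "" = "") (hdiag : (lcp.getD i []).getD i 0 = 0) :
    (pvBuildA lcp n cs s i).getD i "" = "" ∧ (pvBuildA lcp n cs s i).length = n := by
  induction cs generalizing s with
  | nil => exact ⟨hempty, hlen⟩
  | cons c cs ih =>
      have hskip : pvSkip s n i = i := pvSkip_stop s n i (Or.inr hempty)
      have hne : ¬ i = n := by omega
      simp only [pvBuildA, hskip, if_neg hne]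
      refine ih _ (by rw [pvFill_length, hlen]) ?_
      rw [pvFill_getD_self _ _ _ _ _ hin (by omega), hdiag, if_neg (by simp)]
      exact hempty

lemma pvLetters_drop (k : Nat) (hk : k < 26) :
    pvLetters.drop k = pvLetterB k :: pvLetters.drop (k + 1) := by
  interval_cases k <;> decide

lemma pvBuildA_done (lcp : List (List Int)) (n : Nat) (cs : List String) (s : List String) :
    pvBuildA lcp n cs s n = s := by
  cases cs with
  | nil => rfl
  | cons c cs =>
      have : pvSkip s n n = n := pvSkip_stop s n n (Or.inl (by omega))
      simp [pvBuildA, this]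

-- leader test of B ⟺ "position uncovered", given all leaders are earlier
lemma pvAll_iff (lcp : List (List Int)) (L : List Nat) (i : Nat) (hlt : ∀ l ∈ L, l < i) :
    (L.all (fun l => (lcp.getD l []).getD i 0 == 0)) = true ↔ pvLetterOf lcp L i = "" := by
  rw [pvLetterOf_empty_iff, List.all_eq_true]
  constructor
  · intro h k hk
    have hmem : L.getD k 0 ∈ L := by
      rw [List.getD_eq_getElem _ _ hk]; exact List.getElem_mem hk
    have h0 := h _ hmem
    rw [beq_iff_eq] at h0
    rintro ⟨-, hne⟩
    exact hne h0
  · intro h l hl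
    obtain ⟨k, hk, rfl⟩ := List.mem_iff_getElem.mp hl
    have := h k hk
    rw [List.getD_eq_getElem _ _ hk] at this
    simp only [beq_iff_eq]
    have hle : L[k] ≤ i := le_of_lt (hlt _ (List.getElem_mem hk))
    by_contra hne
    exact this ⟨hle, hne⟩

-- MAIN construction lemma: A's letter loop and B's leader scan agree
lemma pvBuild_main (lcp : List (List Int)) (n : Nat) :
    ∀ fuel i L, n ≤ fuel + i → i ≤ n → L.length ≤ 26 → (∀ l ∈ L, l < i) →
      (∀ k, k < i → pvLetterOf lcp L k ≠ "") →
      (pvLeadB lcp (List.range' i (n - i)) L = none →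
          "" ∈ pvBuildA lcp n (pvLetters.drop L.length) (pvMkS lcp L n) i) ∧
      (∀ L', pvLeadB lcp (List.range' i (n - i)) L = some L' →
          pvBuildA lcp n (pvLetters.drop L.length) (pvMkS lcp L n) i = pvMkS lcp L' n ∧
          ∀ k, k < n → pvLetterOf lcp L' k ≠ "") := by
  intro fuel
  induction fuel with
  | zero =>
      intro i L hfu hi hL hlt hcov
      have hin : i = n := by omega
      subst hin
      rw [Nat.sub_self, List.range'_zero]
      refine ⟨fun h => by simp [pvLeadB] at h, ?_⟩
      intro L' hL'
      simp only [pvLeadB, Option.some.injEq] at hL'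
      subst hL'
      exact ⟨pvBuildA_done _ _ _ _, fun k hk => hcov k (by omega)⟩
  | succ fuel ih =>
      intro i L hfu hi hL hlt hcov
      by_cases hin : i < n
      · have hrange : List.range' i (n - i) = i :: List.range' (i + 1) (n - (i + 1)) := by
          have h1 : n - i = (n - (i + 1)) + 1 := by omega
          rw [h1, List.range'_succ]
        rw [hrange]
        simp only [pvLeadB]
        by_cases hcovi : pvLetterOf lcp L i = ""
        · rw [if_pos ((pvAll_iff lcp L i hlt).mpr hcovi)]
          by_cases h26 : L.length = 26 ∨ (lcp.getD i []).getD i 0 = 0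
          · rw [if_pos h26]
            refine ⟨fun _ => ?_, fun L' hL' => by simp at hL'⟩
            rcases h26 with h26 | hdiag
            · rw [h26]
              have hd : pvLetters.drop 26 = [] := by decide
              rw [hd]
              show "" ∈ pvBuildA lcp n [] (pvMkS lcp L n) i
              simp only [pvBuildA]
              exact getD_mem _ i (by rw [pvMkS_length]; exact hin)
                (by rw [pvMkS_getD _ _ _ _ hin]; exact hcovi)
            · obtain ⟨h1, h2⟩ := pvBuildA_stuck lcp n _ (pvMkS lcp L n) i hin
                (pvMkS_length _ _ _) (by rw [pvMkS_getD _ _ _ _ hin]; exact hcovi) hdiag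
              exact getD_mem _ i (by omega) h1
          · rw [if_neg h26]
            push_neg at h26
            obtain ⟨h26l, hdiag⟩ := h26
            have hlen26 : L.length < 26 := by omega
            rw [pvLetters_drop L.length hlen26]
            have hskip : pvSkip (pvMkS lcp L n) n i = i :=
              pvSkip_stop _ _ _ (Or.inr (by rw [pvMkS_getD _ _ _ _ hin]; exact hcovi))
            have hstep : pvBuildA lcp n (pvLetterB L.length :: pvLetters.drop (L.length + 1))
                  (pvMkS lcp L n) i
                = pvBuildA lcp n (pvLetters.drop (L.length + 1)) (pvMkS lcp (L ++ [i]) n) (i + 1) := by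
              simp only [pvBuildA, hskip, if_neg (by omega : ¬ i = n)]
              rw [pvFill_mkS]
              exact pvBuildA_skip _ _ _ _ i hin (by
                rw [pvMkS_getD _ _ _ _ hin, pvLetterOf_snoc, if_pos ⟨le_refl i, hdiag⟩]
                exact pvLetterB_ne _)
            rw [hstep]
            have hmain := ih (i + 1) (L ++ [i]) (by omega) (by omega)
              (by simp; omega)
              (by intro l hl
                  rcases List.mem_append.mp hl with h | h
                  · exact lt_trans (hlt l h) (by omega)
                  · simp at h; omega)
              (by intro k hk
                  rw [pvLetterOf_snoc]
                  by_cases hik : i ≤ k ∧ (lcp.getD i []).getD k 0 ≠ 0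
                  · rw [if_pos hik]; exact pvLetterB_ne _
                  · rw [if_neg hik]
                    rcases Nat.lt_or_ge k i with h | h
                    · exact hcov k h
                    · have : k = i := by omega
                      subst this
                      exact absurd ⟨le_refl k, hdiag⟩ hik)
            have hlenr : (L ++ [i]).length = L.length + 1 := by simp
            rw [hlenr] at hmain
            exact hmain
        · rw [if_neg (fun h => hcovi ((pvAll_iff lcp L i hlt).mp h))]
          rw [pvBuildA_skip _ _ _ _ i hin (by rw [pvMkS_getD _ _ _ _ hin]; exact hcovi)]
          exact ih (i + 1) L (by omega) (by omega) hL
            (fun l hl => lt_trans (hlt l hl) (by omega))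
            (by intro k hk
                rcases Nat.lt_or_ge k i with h | h
                · exact hcov k h
                · have : k = i := by omega
                  subst this
                  exact hcovi)
      · have hie : i = n := by omega
        subst hie
        rw [Nat.sub_self, List.range'_zero]
        refine ⟨fun h => by simp [pvLeadB] at h, ?_⟩
        intro L' hL'
        simp only [pvLeadB, Option.some.injEq] at hL'
        subst hL'
        exact ⟨pvBuildA_done _ _ _ _, fun k hk => hcov k (by omega)⟩

-- check-phase: A's in-place recurrence test ⟺ B's direct suffix comparison
def pvSlcpR (s : List String) (n : Nat) (i j : Nat) : Nat :=
  if h : i < n ∧ j < n ∧ s.getD i "" = s.getD j "" then pvSlcpR s n (i + 1) (j + 1) + 1 else 0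
  termination_by n - i
  decreasing_by omega

lemma pvSlcpLoop_eq (s : List String) (n i j : Nat) :
    ∀ m, pvSlcpLoop s n i j m = m + pvSlcpR s n (i + m) (j + m) := by
  have aux : ∀ d m, n - m ≤ d → pvSlcpLoop s n i j m = m + pvSlcpR s n (i + m) (j + m) := by
    intro d
    induction d with
    | zero =>
        intro m hm
        rw [pvSlcpLoop, dif_neg (by rintro ⟨h1, -, -⟩; omega),
            pvSlcpR, dif_neg (by rintro ⟨h1, -⟩; omega)]
        omega
    | succ d ihd =>
        intro m hm
        by_cases h : i + m < n ∧ j + m < n ∧ s.getD (i + m) "" = s.getD (j + m) ""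
        · rw [pvSlcpLoop, dif_pos h, ihd (m + 1) (by omega)]
          have e1 : i + (m + 1) = i + m + 1 := by omega
          have e2 : j + (m + 1) = j + m + 1 := by omega
          rw [e1, e2]
          conv_rhs => rw [pvSlcpR, dif_pos h]
          ring
        · rw [pvSlcpLoop, dif_neg h, pvSlcpR, dif_neg h]
          omega
  exact fun m => aux (n - m) m le_rfl

lemma pvCheckRowA_all (lcp : List (List Int)) (s : List String) (n i : Nat) (l : List Nat) :
    pvCheckRowA lcp s n i l
      = l.all (fun j => (lcp.getD i []).getD j 0 == pvActualA lcp s n i j) := by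
  induction l with
  | nil => rfl
  | cons j js ih => simp [pvCheckRowA, ih]

lemma pvCheckA_all (lcp : List (List Int)) (s : List String) (n : Nat) (l : List Nat) :
    pvCheckA lcp s n l
      = l.all (fun i => ((List.range n).reverse).all
          (fun j => (lcp.getD i []).getD j 0 == pvActualA lcp s n i j)) := by
  induction l with
  | nil => rfl
  | cons i is ih => simp [pvCheckA, ih, pvCheckRowA_all]

lemma pvRec_to_slcp (lcp : List (List Int)) (s : List String) (n : Nat)
    (h : ∀ i < n, ∀ j < n, (lcp.getD i []).getD j 0 = pvActualA lcp s n i j) :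
    ∀ d i j, n - i ≤ d → i < n → j < n →
      (lcp.getD i []).getD j 0 = (pvSlcpR s n i j : Int) := by
  intro d
  induction d with
  | zero => intro i j hle hi hj; omega
  | succ d ihd =>
      intro i j hle hi hj
      have hrec := h i hi j hj
      unfold pvActualA at hrec
      by_cases hs : s.getD i "" = s.getD j ""
      · rw [if_neg (by simpa using hs)] at hrec
        by_cases hb : i = n - 1 ∨ j = n - 1
        · rw [if_pos hb] at hrec
          rw [pvSlcpR, dif_pos ⟨hi, hj, hs⟩, pvSlcpR,
              dif_neg (by rintro ⟨h1, h2, -⟩; omega)]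
          rw [hrec]; rfl
        · rw [if_neg hb] at hrec
          push_neg at hb
          have hi1 : i + 1 < n := by omega
          have hj1 : j + 1 < n := by omega
          have hih := ihd (i + 1) (j + 1) (by omega) hi1 hj1
          rw [pvSlcpR, dif_pos ⟨hi, hj, hs⟩, hrec, hih]
          push_cast
          ring
      · rw [if_pos (by simpa using hs)] at hrec
        rw [pvSlcpR, dif_neg (by rintro ⟨-, -, h3⟩; exact hs h3), hrec]
        rfl

lemma pvSlcp_to_rec (lcp : List (List Int)) (s : List String) (n : Nat)
    (h : ∀ i < n, ∀ j < n, (lcp.getD i []).getD j 0 = (pvSlcpR s n i j : Int)) :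
    ∀ i < n, ∀ j < n, (lcp.getD i []).getD j 0 = pvActualA lcp s n i j := by
  intro i hi j hj
  have hv := h i hi j hj
  unfold pvActualA
  by_cases hs : s.getD i "" = s.getD j ""
  · rw [if_neg (by simpa using hs)]
    by_cases hb : i = n - 1 ∨ j = n - 1
    · rw [if_pos hb, hv, pvSlcpR, dif_pos ⟨hi, hj, hs⟩, pvSlcpR,
          dif_neg (by rintro ⟨h1, h2, -⟩; omega)]
      rfl
    · rw [if_neg hb]
      push_neg at hb
      have hi1 : i + 1 < n := by omega
      have hj1 : j + 1 < n := by omega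
      rw [h (i + 1) hi1 (j + 1) hj1, hv, pvSlcpR, dif_pos ⟨hi, hj, hs⟩]
      push_cast
      ring
  · rw [if_pos (by simpa using hs), hv, pvSlcpR, dif_neg (by rintro ⟨-, -, h3⟩; exact hs h3)]
    rfl

lemma pvCheck_eq (lcp : List (List Int)) (s : List String) (n : Nat) :
    pvCheckA lcp s n (List.range n).reverse = pvCheckBs lcp s n := by
  have key : ∀ (x y : Bool), (x = true ↔ y = true) → x = y := by decide
  apply key
  rw [pvCheckA_all]
  unfold pvCheckBs
  simp only [List.all_eq_true, List.all_reverse, List.mem_range, beq_iff_eq,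
    pvSlcpLoop_eq, Nat.zero_add, Nat.add_zero]
  constructor
  · intro h i hi j hj
    exact pvRec_to_slcp lcp s n (fun i' hi' j' hj' => h i' hi' j' hj') n i j (by omega) hi hj
  · intro h i hi j hj
    exact pvSlcp_to_rec lcp s n (fun i' hi' j' hj' => h i' hi' j' hj') i hi j hj

lemma pvMkS_nil (lcp : List (List Int)) (n : Nat) :
    pvMkS lcp [] n = List.replicate n "" := by
  unfold pvMkS
  rw [List.map_congr_left (fun a _ => by simp [pvLetterOf] : ∀ a ∈ List.range n, pvLetterOf lcp [] a = "")]
  simp [List.map_const']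

lemma pvNotMem (lcp : List (List Int)) (L : List Nat) (n : Nat)
    (hcov : ∀ k, k < n → pvLetterOf lcp L k ≠ "") : ¬ "" ∈ pvMkS lcp L n := by
  intro hmem
  obtain ⟨k, hk, hval⟩ := List.mem_map.mp hmem
  exact hcov k (List.mem_range.mp hk) hval

-- ===== VERDICT (by name: the statement is the Claim_ definition above) =====
theorem findTheString_spec : Claim_equal_findTheString := by
  intro lcp _ _
  unfold Spec_findTheString
  simp only [findTheString, findTheString_alt]
  obtain ⟨hnone, hsome⟩ := pvBuild_main lcp lcp.length lcp.length 0 []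
    (by omega) (by omega) (by simp) (by simp) (by omega)
  rw [Nat.sub_zero, ← List.range_eq_range'] at hnone hsome
  rw [List.length_nil, List.drop_zero, pvMkS_nil] at hnone hsome
  cases hB : pvLeadB lcp (List.range lcp.length) [] with
  | none =>
      have hmem := hnone hB
      rw [if_pos (by rwa [List.contains_iff_mem])]
  | some L =>
      obtain ⟨hAeq, hcov⟩ := hsome L hB
      have hnm := pvNotMem lcp L lcp.length hcov
      rw [hAeq]
      rw [if_neg (by rw [List.contains_iff_mem]; exact hnm)]
      rw [pvCheck_eq]
      rfl
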